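-- pv_equiv track=rewrite | github.com/IrinaOltean14/University | First year/Semester 1/Fundamentals of Programming/A6/ui.py | process_command
-- ===== SOURCE A (Python) =====
-- def process_command(user_command):
--     # remove leading and trailing whitespace
--     command_word = ''
--     first_word = True
--     parameters = []
--     user_command = user_command.strip()
--     i = 0
--     while i < len(user_command):
--         if user_command[i] == " ":
--             pass
--         elif user_command[i] >= '0' and user_command[i] <= '9':
--             parameter = 0
--             while user_command[i] >= '0' and user_command[i] <= '9':
--                 parameter = parameter * 10 + int(user_command[i])
--                 i += 1
--                 if i >= len(user_command):
--                     break
--             parameters.append(parameter)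
--             i -= 1
--         elif (user_command[i] >= 'a' and user_command[i] <= 'z') or (user_command[i]>='A' and user_command[i]<='Z'):
--             word = ''
--             while (user_command[i] >= 'a' and user_command[i] <= 'z') or (user_command[i]>='A' and user_command[i]<='Z'):
--                 word = word + user_command[i]
--                 i += 1
--                 if i >= len(user_command):
--                     break
--             if first_word:
--                 command_word = word
--                 first_word = False
--             else:
--                 command_word = command_word + ' ' + word
--             i -= 1
--         elif user_command[i] == '>' or user_command[i] == '<' or user_command[i] == '=':
--             command_word = command_word + ' ' + user_command[i]
--         i += 1
--     return command_word, parameters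
-- ===== SOURCE B (Python) =====
-- def _classify(ch):
--     """Kind of a character: 'd' digit, 'w' letter, 's' special (<>=), 'x' ignored."""
--     if '0' <= ch <= '9':
--         return 'd'
--     if 'a' <= ch <= 'z' or 'A' <= ch <= 'Z':
--         return 'w'
--     if ch == '<' or ch == '>' or ch == '=':
--         return 's'
--     return 'x'
--
--
-- def process_command(user_command):
--     # single pass over the characters, tracking the class of the previous character
--     command_word = ''
--     first_word = True
--     parameters = []
--     num = 0
--     prev = 'x'
--     for ch in user_command:
--         k = _classify(ch)
--         if prev == 'd' and k != 'd':
--             parameters.append(num)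
--         if k == 'd':
--             num = num * 10 + int(ch) if prev == 'd' else int(ch)
--         elif k == 'w':
--             if prev == 'w':
--                 command_word += ch
--             elif first_word:
--                 command_word = ch
--                 first_word = False
--             else:
--                 command_word += ' ' + ch
--         elif k == 's':
--             command_word += ' ' + ch
--         prev = k
--     if prev == 'd':
--         parameters.append(num)
--     return command_word, parameters
-- ===== Notes on version B (the rewrite author's own statement) =====
-- stated objective: simpler
-- what changed: A's index-driven scanner with two nested inner while-loops and i-=1 backtracking over a pre-stripped string is replaced by a single forward for-loop over the characters that classifies each character and tracks the class of the previous one, flushing the pending number at run boundaries (no strip, no indices, no nested loops).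
import Mathlib
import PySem

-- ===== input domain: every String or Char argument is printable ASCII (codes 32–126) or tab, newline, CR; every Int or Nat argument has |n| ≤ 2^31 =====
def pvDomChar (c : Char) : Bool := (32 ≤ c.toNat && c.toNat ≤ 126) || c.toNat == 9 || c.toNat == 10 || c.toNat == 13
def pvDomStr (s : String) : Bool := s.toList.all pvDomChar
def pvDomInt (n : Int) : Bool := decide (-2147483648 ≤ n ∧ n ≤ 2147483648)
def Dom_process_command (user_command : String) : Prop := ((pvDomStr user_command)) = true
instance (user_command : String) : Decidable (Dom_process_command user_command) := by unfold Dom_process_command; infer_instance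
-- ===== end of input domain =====

-- B re-implements A's index-driven scanner (nested while loops, i -= 1 backtracking) as a
-- single forward fold over the characters that tracks the class of the previous character;
-- objective: simpler (one pass, no index arithmetic, no nested loops); a timing run also
-- measured B faster (A rebuilds word/command_word by 'word = word + ch', copying the prefix each time).

-- ===== PORT A =====
-- Python compares characters by code point: '0' <= c <= '9' etc.  (exact)
def pvIsDigitA (c : Char) : Bool := 48 ≤ c.toNat && c.toNat ≤ 57
def pvIsAlphaA (c : Char) : Bool := (97 ≤ c.toNat && c.toNat ≤ 122) || (65 ≤ c.toNat && c.toNat ≤ 90)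
-- int(c) for a digit character c  (exact: only applied to '0'..'9')
def pvDigitVal (c : Char) : Int := (c.toNat : Int) - 48

-- A's inner digit while-loop: returns (parameter, i) at loop exit.
-- fuel is a totality guard only: callers pass cs.length, and cs.length - i ≤ fuel always holds.
def pvANum (cs : List Char) : Nat → Nat → Int → Int × Nat
  | 0, i, p => (p, i)
  | fuel + 1, i, p =>
    if h : i < cs.length then
      if pvIsDigitA cs[i] then pvANum cs fuel (i + 1) (p * 10 + pvDigitVal cs[i]) else (p, i)
    else (p, i)

-- A's inner word while-loop: returns (word, i) at loop exit
def pvAWord (cs : List Char) : Nat → Nat → List Char → List Char × Nat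
  | 0, i, w => (w, i)
  | fuel + 1, i, w =>
    if h : i < cs.length then
      if pvIsAlphaA cs[i] then pvAWord cs fuel (i + 1) (w ++ [cs[i]]) else (w, i)
    else (w, i)

-- A's outer while-loop (i -= 1 then i += 1 transliterated as (· - 1) + 1);
-- fuel is again only a totality guard (each iteration advances i by at least one)
def pvALoop (cs : List Char) : Nat → Nat → List Char → Bool → List Int → List Char × List Int
  | 0, _, cw, _, ps => (cw, ps)
  | fuel + 1, i, cw, first, ps =>
    if h : i < cs.length then
      let c := cs[i]
      if c = ' ' then pvALoop cs fuel (i + 1) cw first ps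
      else if pvIsDigitA c then
        let r := pvANum cs cs.length i 0
        pvALoop cs fuel (r.2 - 1 + 1) cw first (ps ++ [r.1])
      else if pvIsAlphaA c then
        let r := pvAWord cs cs.length i []
        if first then pvALoop cs fuel (r.2 - 1 + 1) r.1 false ps
        else pvALoop cs fuel (r.2 - 1 + 1) (cw ++ ' ' :: r.1) first ps
      else if c = '>' ∨ c = '<' ∨ c = '=' then pvALoop cs fuel (i + 1) (cw ++ [' ', c]) first ps
      else pvALoop cs fuel (i + 1) cw first ps
    else (cw, ps)

def process_command (user_command : String) : String × List Int :=
  let cs := PySem.Chars.strip user_command.toList   -- user_command.strip()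
  let r := pvALoop cs cs.length 0 [] true []
  (String.ofList r.1, r.2)

-- ===== PORT B =====
-- same code-point comparisons as Source B's _classify  (exact)
def pvBIsDigit (c : Char) : Bool := 48 ≤ c.toNat && c.toNat ≤ 57
def pvBIsAlpha (c : Char) : Bool := (97 ≤ c.toNat && c.toNat ≤ 122) || (65 ≤ c.toNat && c.toNat ≤ 90)

def pvClassify (c : Char) : Char :=
  if pvBIsDigit c then 'd'
  else if pvBIsAlpha c then 'w'
  else if c = '<' ∨ c = '>' ∨ c = '=' then 's'
  else 'x'

-- the loop variables of Source B's single pass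
structure PvBState where
  cw : List Char
  first : Bool
  ps : List Int
  num : Int
  prev : Char
deriving Repr, DecidableEq

-- one iteration of Source B's for-loop
def pvBStep (st : PvBState) (ch : Char) : PvBState :=
  let k := pvClassify ch
  let st := if st.prev = 'd' ∧ k ≠ 'd' then { st with ps := st.ps ++ [st.num] } else st
  if k = 'd' then
    { st with num := if st.prev = 'd' then st.num * 10 + pvDigitVal ch else pvDigitVal ch,
              prev := k }
  else if k = 'w' then
    if st.prev = 'w' then { st with cw := st.cw ++ [ch], prev := k }
    else if st.first then { st with cw := [ch], first := false, prev := k }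
    else { st with cw := st.cw ++ ' ' :: [ch], prev := k }
  else if k = 's' then { st with cw := st.cw ++ [' ', ch], prev := k }
  else { st with prev := k }

-- the trailing flush and the return value
def pvBFinish (st : PvBState) : List Char × List Int :=
  if st.prev = 'd' then (st.cw, st.ps ++ [st.num]) else (st.cw, st.ps)

def process_command_alt (user_command : String) : String × List Int :=
  let r := pvBFinish (user_command.toList.foldl pvBStep ⟨[], true, [], 0, 'x'⟩)
  (String.ofList r.1, r.2)

-- ===== PRECONDITION & SPEC =====
def Spec_process_command (user_command : String) (out : String × List Int) : Prop := out = process_command_alt user_command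
instance (user_command : String) (out : String × List Int) : Decidable (Spec_process_command user_command out) := by unfold Spec_process_command; infer_instance

-- ===== CLAIM (what is proved, stated in full; the proofs are below) =====
def Claim_equal_process_command : Prop := ∀ (user_command : String), Dom_process_command user_command → Spec_process_command user_command (process_command user_command)

-- ===== LEMMAS AND PROOFS =====


-- classification facts
theorem pv_cl_d {c : Char} (hd : pvIsDigitA c = true) : pvClassify c = 'd' := by
  simp [pvClassify, pvBIsDigit, pvIsDigitA] at hd ⊢; omega

theorem pv_cl_d_iff {c : Char} : pvClassify c = 'd' ↔ pvIsDigitA c = true := by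
  unfold pvClassify pvBIsDigit; unfold pvIsDigitA; split_ifs <;> simp_all

theorem pv_cl_w_iff {c : Char} : pvClassify c = 'w' ↔ (pvIsDigitA c = false ∧ pvIsAlphaA c = true) := by
  unfold pvClassify pvBIsDigit pvBIsAlpha; unfold pvIsDigitA pvIsAlphaA; split_ifs <;> simp_all

theorem pv_cl_s {c : Char} (hd : pvIsDigitA c = false) (ha : pvIsAlphaA c = false)
    (hs : c = '>' ∨ c = '<' ∨ c = '=') : pvClassify c = 's' := by
  unfold pvClassify pvBIsDigit pvBIsAlpha; simp only [pvIsDigitA] at hd; simp only [pvIsAlphaA] at ha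
  rw [if_neg (by simp_all), if_neg (by simp_all), if_pos (by tauto)]

theorem pv_cl_x {c : Char} (hd : pvIsDigitA c = false) (ha : pvIsAlphaA c = false)
    (hs : ¬ (c = '>' ∨ c = '<' ∨ c = '=')) : pvClassify c = 'x' := by
  unfold pvClassify pvBIsDigit pvBIsAlpha; simp only [pvIsDigitA] at hd; simp only [pvIsAlphaA] at ha
  rw [if_neg (by simp_all), if_neg (by simp_all), if_neg (by tauto)]

theorem pv_alpha_not_digit {c : Char} (ha : pvIsAlphaA c = true) : pvIsDigitA c = false := by
  simp [pvIsAlphaA, pvIsDigitA] at ha ⊢; omega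

-- Horner evaluation of a digit run
def pvHorner (p : Int) (ds : List Char) : Int := ds.foldl (fun a c => a * 10 + pvDigitVal c) p

theorem pvHorner_cons (p : Int) (c : Char) (ds : List Char) :
    pvHorner p (c :: ds) = pvHorner (p * 10 + pvDigitVal c) ds := rfl

theorem pv_drop_takeWhile (p : Char → Bool) (l : List Char) :
    l.drop (l.takeWhile p).length = l.dropWhile p := by
  induction l with
  | nil => simp
  | cons c t ih => by_cases h : p c <;> simp [h, ih]

-- characterisation of A's inner loops
theorem pv_dropWhile_head (p : Char → Bool) (l : List Char) (c : Char) (t : List Char)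
    (h : l.dropWhile p = c :: t) : p c = false := by
  induction l with
  | nil => simp at h
  | cons a l ih =>
    by_cases hp : p a
    · rw [List.dropWhile_cons_of_pos hp] at h; exact ih h
    · rw [List.dropWhile_cons_of_neg hp] at h
      obtain ⟨rfl, -⟩ := List.cons.inj h
      simpa using hp

theorem pvALoop_ge (cs : List Char) (fuel i : Nat) (cw : List Char) (first : Bool)
    (ps : List Int) (h : cs.length ≤ i) : pvALoop cs fuel i cw first ps = (cw, ps) := by
  cases fuel <;> simp [pvALoop, Nat.not_lt.mpr h]

theorem pvANum_eq (cs : List Char) : ∀ (fuel i : Nat), cs.length - i ≤ fuel → ∀ (p : Int),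
    pvANum cs fuel i p = (pvHorner p ((cs.drop i).takeWhile pvIsDigitA),
                          i + ((cs.drop i).takeWhile pvIsDigitA).length) := by
  intro fuel
  induction fuel with
  | zero =>
    intro i hle p
    rw [List.drop_eq_nil_of_le (by omega)]
    simp [pvANum, pvHorner]
  | succ fuel ih =>
    intro i hle p
    by_cases h : i < cs.length
    · rw [List.drop_eq_getElem_cons h]
      by_cases hd : pvIsDigitA cs[i]
      · rw [List.takeWhile_cons_of_pos hd]
        simp only [pvANum, h, ↓reduceDIte, hd, if_pos]
        rw [ih (i + 1) (by omega)]
        simp [pvHorner_cons]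
        omega
      · rw [List.takeWhile_cons_of_neg (by simpa using hd)]
        simp [pvANum, h, hd, pvHorner]
    · rw [List.drop_eq_nil_of_le (by omega)]
      simp [pvANum, h, pvHorner]

theorem pvAWord_eq (cs : List Char) : ∀ (fuel i : Nat), cs.length - i ≤ fuel → ∀ (w : List Char),
    pvAWord cs fuel i w = (w ++ (cs.drop i).takeWhile pvIsAlphaA,
                           i + ((cs.drop i).takeWhile pvIsAlphaA).length) := by
  intro fuel
  induction fuel with
  | zero =>
    intro i hle w
    rw [List.drop_eq_nil_of_le (by omega)]
    simp [pvAWord]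
  | succ fuel ih =>
    intro i hle w
    by_cases h : i < cs.length
    · rw [List.drop_eq_getElem_cons h]
      by_cases ha : pvIsAlphaA cs[i]
      · rw [List.takeWhile_cons_of_pos ha]
        simp only [pvAWord, h, ↓reduceDIte, ha, if_pos]
        rw [ih (i + 1) (by omega)]
        simp
        omega
      · rw [List.takeWhile_cons_of_neg (by simpa using ha)]
        simp [pvAWord, h, ha]
    · rw [List.drop_eq_nil_of_le (by omega)]
      simp [pvAWord, h]

-- B's fold over a run of digits / letters
theorem pvBRunD (ds : List Char) (hds : ∀ c ∈ ds, pvIsDigitA c = true) :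
    ∀ (cw : List Char) (first : Bool) (ps : List Int) (n : Int),
    List.foldl pvBStep ⟨cw, first, ps, n, 'd'⟩ ds = ⟨cw, first, ps, pvHorner n ds, 'd'⟩ := by
  induction ds with
  | nil => intro cw first ps n; simp [pvHorner]
  | cons c t ih =>
    intro cw first ps n
    have hc := hds c (by simp)
    rw [List.foldl_cons]
    have hstep : pvBStep ⟨cw, first, ps, n, 'd'⟩ c = ⟨cw, first, ps, n * 10 + pvDigitVal c, 'd'⟩ := by
      simp [pvBStep, pv_cl_d hc]
    rw [hstep, ih (fun c hc => hds c (by simp [hc])), pvHorner_cons]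

theorem pvBRunW (ws : List Char) (hws : ∀ c ∈ ws, pvIsAlphaA c = true) :
    ∀ (cw : List Char) (first : Bool) (ps : List Int) (n : Int),
    List.foldl pvBStep ⟨cw, first, ps, n, 'w'⟩ ws = ⟨cw ++ ws, first, ps, n, 'w'⟩ := by
  induction ws with
  | nil => intro cw first ps n; simp
  | cons c t ih =>
    intro cw first ps n
    have hc := hws c (by simp)
    rw [List.foldl_cons]
    have hstep : pvBStep ⟨cw, first, ps, n, 'w'⟩ c = ⟨cw ++ [c], first, ps, n, 'w'⟩ := by
      simp [pvBStep, pv_cl_w_iff.mpr ⟨pv_alpha_not_digit hc, hc⟩]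
    rw [hstep, ih (fun c hc => hws c (by simp [hc]))]
    simp

-- flushing at a run boundary
theorem pvFlushD (cw : List Char) (first : Bool) (ps : List Int) (n : Int) (ch : Char)
    (hk : pvClassify ch ≠ 'd') :
    pvBStep ⟨cw, first, ps, n, 'd'⟩ ch = pvBStep ⟨cw, first, ps ++ [n], n, 'x'⟩ ch := by
  simp [pvBStep, hk]

theorem pvFlushW (cw : List Char) (first : Bool) (ps : List Int) (n : Int) (ch : Char)
    (hk : pvClassify ch ≠ 'w') :
    pvBStep ⟨cw, first, ps, n, 'w'⟩ ch = pvBStep ⟨cw, first, ps, n, 'x'⟩ ch := by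
  simp [pvBStep, hk]

-- a previous class 's' behaves exactly like 'x'
theorem pvPrevS (l : List Char) (cw : List Char) (first : Bool) (ps : List Int) (n : Int) :
    pvBFinish (List.foldl pvBStep ⟨cw, first, ps, n, 's'⟩ l) =
    pvBFinish (List.foldl pvBStep ⟨cw, first, ps, n, 'x'⟩ l) := by
  cases l with
  | nil => simp [pvBFinish]
  | cons c t =>
    have hstep : pvBStep ⟨cw, first, ps, n, 's'⟩ c = pvBStep ⟨cw, first, ps, n, 'x'⟩ c := by
      simp [pvBStep]
    rw [List.foldl_cons, List.foldl_cons, hstep]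

theorem pv_main (cs : List Char) : ∀ (fuel i : Nat), cs.length - i ≤ fuel →
    ∀ (cw : List Char) (first : Bool) (ps : List Int) (num : Int),
    pvALoop cs fuel i cw first ps =
      pvBFinish (List.foldl pvBStep ⟨cw, first, ps, num, 'x'⟩ (cs.drop i)) := by
  intro fuel
  induction fuel with
  | zero =>
    intro i hle cw first ps num
    rw [pvALoop_ge cs 0 i cw first ps (by omega), List.drop_eq_nil_of_le (by omega)]
    simp [pvBFinish]
  | succ fuel ih =>
    intro i hle cw first ps num
    by_cases h : i < cs.length
    · have hdrop : cs.drop i = cs[i] :: cs.drop (i + 1) := List.drop_eq_getElem_cons h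
      simp only [pvALoop, h, ↓reduceDIte]
      by_cases hsp : cs[i] = ' '
      · rw [if_pos hsp, hdrop, List.foldl_cons]
        have hstep : pvBStep ⟨cw, first, ps, num, 'x'⟩ cs[i] = ⟨cw, first, ps, num, 'x'⟩ := by
          rw [hsp]; simp [pvBStep, pvClassify, pvBIsDigit, pvBIsAlpha]
        rw [hstep]
        exact ih (i + 1) (by omega) cw first ps num
      · rw [if_neg hsp]
        by_cases hd : pvIsDigitA cs[i]
        · rw [if_pos hd]
          have hnum := pvANum_eq cs cs.length i (by omega) 0
          have hrun : (cs.drop i).takeWhile pvIsDigitA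
              = cs[i] :: ((cs.drop (i + 1)).takeWhile pvIsDigitA) := by
            rw [hdrop, List.takeWhile_cons_of_pos hd]
          have hlen : 1 ≤ ((cs.drop i).takeWhile pvIsDigitA).length := by rw [hrun]; simp
          simp only [hnum]
          rw [show i + ((cs.drop i).takeWhile pvIsDigitA).length - 1 + 1
              = i + ((cs.drop i).takeWhile pvIsDigitA).length by omega]
          conv_rhs => rw [← List.takeWhile_append_dropWhile (p := pvIsDigitA) (l := cs.drop i)]
          rw [List.foldl_append]
          have hfold1 : List.foldl pvBStep ⟨cw, first, ps, num, 'x'⟩ ((cs.drop i).takeWhile pvIsDigitA)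
              = ⟨cw, first, ps, pvHorner 0 ((cs.drop i).takeWhile pvIsDigitA), 'd'⟩ := by
            rw [hrun, List.foldl_cons]
            have hstep : pvBStep ⟨cw, first, ps, num, 'x'⟩ cs[i]
                = ⟨cw, first, ps, pvDigitVal cs[i], 'd'⟩ := by
              simp [pvBStep, pv_cl_d hd]
            rw [hstep, pvBRunD _ (fun c hc => List.mem_takeWhile_imp hc), pvHorner_cons]
            norm_num
          rw [hfold1]
          have hdw : (cs.drop i).dropWhile pvIsDigitA
              = cs.drop (i + ((cs.drop i).takeWhile pvIsDigitA).length) := by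
            rw [← pv_drop_takeWhile pvIsDigitA (cs.drop i), List.drop_drop, Nat.add_comm]
          rw [hdw]
          rcases hrest : cs.drop (i + ((cs.drop i).takeWhile pvIsDigitA).length) with _ | ⟨c2, rest'⟩
          · have hj : cs.length ≤ i + ((cs.drop i).takeWhile pvIsDigitA).length := by
              simpa using List.drop_eq_nil_iff.mp hrest
            rw [pvALoop_ge cs fuel _ _ _ _ (by omega)]
            simp [pvBFinish]
          · have hc2 : pvIsDigitA c2 = false :=
              pv_dropWhile_head pvIsDigitA (cs.drop i) c2 rest' (by rw [hdw, hrest])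
            rw [List.foldl_cons, pvFlushD _ _ _ _ _ (by simp [Ne, pv_cl_d_iff, hc2]),
              ← List.foldl_cons, ← hrest]
            exact ih _ (by omega) cw first _ _
        · by_cases ha : pvIsAlphaA cs[i]
          · rw [if_neg (by simp [hd]), if_pos ha]
            have hword := pvAWord_eq cs cs.length i (by omega) []
            have hrun : (cs.drop i).takeWhile pvIsAlphaA
                = cs[i] :: ((cs.drop (i + 1)).takeWhile pvIsAlphaA) := by
              rw [hdrop, List.takeWhile_cons_of_pos ha]
            have hlen : 1 ≤ ((cs.drop i).takeWhile pvIsAlphaA).length := by rw [hrun]; simp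
            simp only [hword]
            rw [show i + ((cs.drop i).takeWhile pvIsAlphaA).length - 1 + 1
                = i + ((cs.drop i).takeWhile pvIsAlphaA).length by omega]
            conv_rhs => rw [← List.takeWhile_append_dropWhile (p := pvIsAlphaA) (l := cs.drop i)]
            rw [List.foldl_append]
            have hcl : pvClassify cs[i] = 'w' := pv_cl_w_iff.mpr ⟨by simpa using hd, ha⟩
            have hdw : (cs.drop i).dropWhile pvIsAlphaA
                = cs.drop (i + ((cs.drop i).takeWhile pvIsAlphaA).length) := by
              rw [← pv_drop_takeWhile pvIsAlphaA (cs.drop i), List.drop_drop, Nat.add_comm]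
            have hbound : ∀ (cw' : List Char) (first' : Bool),
                pvALoop cs fuel (i + ((cs.drop i).takeWhile pvIsAlphaA).length) cw' first' ps
                = pvBFinish (List.foldl pvBStep ⟨cw', first', ps, num, 'w'⟩
                    ((cs.drop i).dropWhile pvIsAlphaA)) := by
              intro cw' first'
              rw [hdw]
              rcases hrest : cs.drop (i + ((cs.drop i).takeWhile pvIsAlphaA).length)
                with _ | ⟨c2, rest'⟩
              · have hj : cs.length ≤ i + ((cs.drop i).takeWhile pvIsAlphaA).length := by
                  simpa using List.drop_eq_nil_iff.mp hrest
                rw [pvALoop_ge cs fuel _ _ _ _ (by omega)]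
                simp [pvBFinish]
              · have hc2 : pvIsAlphaA c2 = false :=
                  pv_dropWhile_head pvIsAlphaA (cs.drop i) c2 rest' (by rw [hdw, hrest])
                rw [List.foldl_cons, pvFlushW _ _ _ _ _ (by simp [Ne, pv_cl_w_iff, hc2]),
                  ← List.foldl_cons, ← hrest]
                exact ih _ (by omega) cw' first' ps num
            cases first with
            | true =>
              have hstep : pvBStep ⟨cw, true, ps, num, 'x'⟩ cs[i]
                  = ⟨[cs[i]], false, ps, num, 'w'⟩ := by
                simp [pvBStep, hcl]
              rw [if_pos rfl, hrun, List.foldl_cons, hstep,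
                pvBRunW _ (fun c hc => List.mem_takeWhile_imp hc)]
              have := hbound ([cs[i]] ++ (cs.drop (i + 1)).takeWhile pvIsAlphaA) false
              rw [hrun] at this
              simpa using this
            | false =>
              have hstep : pvBStep ⟨cw, false, ps, num, 'x'⟩ cs[i]
                  = ⟨cw ++ [' ', cs[i]], false, ps, num, 'w'⟩ := by
                simp [pvBStep, hcl]
              rw [if_neg (by simp), hrun, List.foldl_cons, hstep,
                pvBRunW _ (fun c hc => List.mem_takeWhile_imp hc)]
              have := hbound (cw ++ [' ', cs[i]] ++ (cs.drop (i + 1)).takeWhile pvIsAlphaA) false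
              rw [hrun] at this
              simpa using this
          · by_cases hs : cs[i] = '>' ∨ cs[i] = '<' ∨ cs[i] = '='
            · rw [if_neg (by simp [hd]), if_neg (by simp [ha]), if_pos hs, hdrop, List.foldl_cons]
              have hstep : pvBStep ⟨cw, first, ps, num, 'x'⟩ cs[i]
                  = ⟨cw ++ [' ', cs[i]], first, ps, num, 's'⟩ := by
                simp [pvBStep, pv_cl_s (by simpa using hd) (by simpa using ha) hs]
              rw [hstep, pvPrevS]
              exact ih (i + 1) (by omega) (cw ++ [' ', cs[i]]) first ps num
            · rw [if_neg (by simp [hd]), if_neg (by simp [ha]), if_neg hs, hdrop, List.foldl_cons]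
              have hstep : pvBStep ⟨cw, first, ps, num, 'x'⟩ cs[i] = ⟨cw, first, ps, num, 'x'⟩ := by
                simp [pvBStep, pv_cl_x (by simpa using hd) (by simpa using ha) hs]
              rw [hstep]
              exact ih (i + 1) (by omega) cw first ps num
    · rw [pvALoop_ge cs _ i cw first ps (by omega), List.drop_eq_nil_of_le (by omega)]
      simp [pvBFinish]


-- whitespace (what strip removes) is ignored by B's classifier
theorem pv_isspace_cl {c : Char} (h : PySem.Chars.isspace c = true) : pvClassify c = 'x' := by
  simp [PySem.Chars.isspace] at h
  apply pv_cl_x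
  · simp [pvIsDigitA]; omega
  · simp [pvIsAlphaA]; omega
  · rintro (rfl | rfl | rfl) <;> exact absurd h (by decide)

-- ignored characters at the start leave B's initial state unchanged
theorem pvLead (sp : List Char) (hsp : ∀ c ∈ sp, pvClassify c = 'x') :
    ∀ (cw : List Char) (first : Bool) (ps : List Int) (n : Int),
    List.foldl pvBStep ⟨cw, first, ps, n, 'x'⟩ sp = ⟨cw, first, ps, n, 'x'⟩ := by
  induction sp with
  | nil => intro cw first ps n; simp
  | cons c t ih =>
    intro cw first ps n
    rw [List.foldl_cons]
    have hstep : pvBStep ⟨cw, first, ps, n, 'x'⟩ c = ⟨cw, first, ps, n, 'x'⟩ := by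
      simp [pvBStep, hsp c (by simp)]
    rw [hstep]
    exact ih (fun c hc => hsp c (by simp [hc])) cw first ps n

theorem pvXFin (st : PvBState) (ch : Char) (h : pvClassify ch = 'x') :
    pvBFinish (pvBStep st ch) = pvBFinish st := by
  obtain ⟨cw, first, ps, n, prev⟩ := st
  by_cases hp : prev = 'd' <;> simp [pvBStep, pvBFinish, h, hp]

-- ignored characters at the end do not change B's result
theorem pvTrail (sp : List Char) (hsp : ∀ c ∈ sp, pvClassify c = 'x') :
    ∀ st : PvBState, pvBFinish (List.foldl pvBStep st sp) = pvBFinish st := by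
  induction sp with
  | nil => intro st; rfl
  | cons c t ih =>
    intro st
    rw [List.foldl_cons, ih (fun c hc => hsp c (by simp [hc])), pvXFin st c (hsp c (by simp))]

-- B's result on the raw string equals B's result on the stripped string
theorem pv_strip_fold (l : List Char) :
    pvBFinish (List.foldl pvBStep ⟨[], true, [], 0, 'x'⟩ l)
    = pvBFinish (List.foldl pvBStep ⟨[], true, [], 0, 'x'⟩ (PySem.Chars.strip l)) := by
  have h1 : l = l.takeWhile PySem.Chars.isspace ++ PySem.Chars.lstrip l := by
    simp [PySem.Chars.lstrip]
  have hm : PySem.Chars.lstrip l = PySem.Chars.strip l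
      ++ ((PySem.Chars.lstrip l).reverse.takeWhile PySem.Chars.isspace).reverse := by
    conv_lhs => rw [← (PySem.Chars.lstrip l).reverse_reverse,
      ← List.takeWhile_append_dropWhile (p := PySem.Chars.isspace)
        (l := (PySem.Chars.lstrip l).reverse)]
    rw [List.reverse_append]
    simp [PySem.Chars.strip, PySem.Chars.rstrip]
  conv_lhs => rw [h1]
  rw [List.foldl_append,
    pvLead _ (fun c hc => pv_isspace_cl (List.mem_takeWhile_imp hc))]
  conv_lhs => rw [hm]
  rw [List.foldl_append,
    pvTrail _ (fun c hc => pv_isspace_cl (List.mem_takeWhile_imp (List.mem_reverse.mp hc)))]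

-- ===== VERDICT (by name: the statement is the Claim_ definition above) =====
theorem process_command_spec : Claim_equal_process_command := by
  intro s _
  unfold Spec_process_command process_command process_command_alt
  dsimp only
  have hmain := pv_main (PySem.Chars.strip s.toList) (PySem.Chars.strip s.toList).length 0
    (by omega) [] true [] 0
  simp only [List.drop_zero] at hmain
  rw [hmain, ← pv_strip_fold]
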